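-- pv_equiv track=rewrite | github.com/JngMkk/Algorithm | Exercise(2022)/Programmers/Python/Implementation/17681.py | solution
-- ===== SOURCE A (Python) =====
-- from typing import List
--
-- def solution(n: int, arr1: List[int], arr2: List[int]) -> List[str]:
--     res: List[str] = []
--
--     for i in range(n):
--         x = bin(arr1[i])[2:].zfill(n)
--         y = bin(arr2[i])[2:].zfill(n)
--         tmp: str = ""
--         for j in range(n):
--             if x[j] == "0" and y[j] == "0":
--                 tmp += " "
--                 continue
--             tmp += "#"
--         res.append(tmp)
--
--     return res
-- ===== SOURCE B (Python) =====
-- from typing import List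
--
-- def solution(n: int, arr1: List[int], arr2: List[int]) -> List[str]:
--     # Blank n-by-n canvas; overlay each array's binary rendering onto it, then join the rows.
--     grid = [[" "] * n for _ in range(n)]
--     for arr in (arr1, arr2):
--         for i in range(n):
--             s = bin(arr[i])[2:].zfill(n)
--             grid[i] = [cell if c == "0" else "#" for cell, c in zip(grid[i], s)]
--     return ["".join(row) for row in grid]
-- ===== Notes on version B (the rewrite author's own statement) =====
-- stated objective: alternative
-- what changed: B replaces A's per-row character-by-character comparison of two padded binary strings with a blank n-by-n canvas onto which each array's binary rendering is overlaid in its own pass (zip-overlay: a non-'0' character paints '#'), joining the rows at the end; Pre_ excludes only the inputs where both programs raise IndexError (n exceeding an array's length).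
import Mathlib
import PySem

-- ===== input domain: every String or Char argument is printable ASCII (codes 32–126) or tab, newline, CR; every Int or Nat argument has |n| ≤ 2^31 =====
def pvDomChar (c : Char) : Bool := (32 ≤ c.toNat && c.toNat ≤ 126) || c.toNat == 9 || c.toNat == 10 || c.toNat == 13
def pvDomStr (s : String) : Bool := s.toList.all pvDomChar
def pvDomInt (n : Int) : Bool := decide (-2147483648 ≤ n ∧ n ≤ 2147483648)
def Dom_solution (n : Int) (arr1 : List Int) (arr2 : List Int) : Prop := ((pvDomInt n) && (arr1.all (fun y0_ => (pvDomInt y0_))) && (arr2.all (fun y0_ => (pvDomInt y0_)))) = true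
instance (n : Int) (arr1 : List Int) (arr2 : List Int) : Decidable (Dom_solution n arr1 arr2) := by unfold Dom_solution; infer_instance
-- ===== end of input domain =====

-- B builds the map on a blank n-by-n canvas, overlaying each array's binary rendering in its
-- own pass (a non-'0' character paints '#'), instead of A's per-row character-by-character
-- comparison of the two padded strings; an alternative decomposition of the same cost.

-- ===== PORT A =====
def solution (n : Int) (arr1 : List Int) (arr2 : List Int) : List String :=
  (PySem.List.pyRange 0 n 1).foldl (fun res i =>
    match PySem.List.pyGet? arr1 i, PySem.List.pyGet? arr2 i with
    | some a1, some a2 =>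
      res ++ [(PySem.List.pyRange 0 n 1).foldl (fun tmp j =>
        match PySem.Str.pyGet? (PySem.Str.zfill (PySem.Str.slice (PySem.Int.pyBin a1) (some 2) none) n) j,
              PySem.Str.pyGet? (PySem.Str.zfill (PySem.Str.slice (PySem.Int.pyBin a2) (some 2) none) n) j with
        | some cx, some cy => if cx = '0' ∧ cy = '0' then tmp ++ " " else tmp ++ "#"
        | _, _ => tmp) ""]   -- none = IndexError, unreachable (zfill makes both strings at least n long)
    | _, _ => res) []        -- none = IndexError, unreachable under Pre_solution

-- ===== PORT B =====
def solution_alt (n : Int) (arr1 : List Int) (arr2 : List Int) : List String :=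
  (([arr1, arr2].foldl (fun grid arr =>
    (PySem.List.pyRange 0 n 1).foldl (fun grid i =>
      match PySem.List.pyGet? arr i with
      | none => grid          -- none = IndexError (arr[i]), unreachable under Pre_solution
      | some v =>
        match PySem.List.pyGet? grid i with
        | none => grid        -- unreachable: grid[i] is always in range
        | some row =>
          grid.set i.toNat (List.zipWith (fun cell c => if c = '0' then cell else "#") row
            (PySem.Str.zfill (PySem.Str.slice (PySem.Int.pyBin v) (some 2) none) n).toList)) grid)
    (List.replicate n.toNat (List.replicate n.toNat " "))).map (fun row => PySem.Str.join "" row))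

-- ===== PRECONDITION & SPEC =====
-- Pre_ excludes exactly the inputs where both programs raise IndexError (n exceeds an array length)
def Pre_solution (n : Int) (arr1 : List Int) (arr2 : List Int) : Prop :=
  n ≤ PySem.List.len arr1 ∧ n ≤ PySem.List.len arr2
instance (n : Int) (arr1 : List Int) (arr2 : List Int) : Decidable (Pre_solution n arr1 arr2) := by
  unfold Pre_solution; infer_instance
def pvWitness_solution : Int × List Int × List Int := (2, [1, 2], [3, 0])
def Spec_solution (n : Int) (arr1 : List Int) (arr2 : List Int) (out : List String) : Prop := out = solution_alt n arr1 arr2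
instance (n : Int) (arr1 : List Int) (arr2 : List Int) (out : List String) : Decidable (Spec_solution n arr1 arr2 out) := by unfold Spec_solution; infer_instance

-- ===== CLAIM (what is proved, stated in full; the proofs are below) =====
def Claim_equal_solution : Prop := ∀ (n : Int) (arr1 : List Int) (arr2 : List Int), Dom_solution n arr1 arr2 → Pre_solution n arr1 arr2 → Spec_solution n arr1 arr2 (solution n arr1 arr2)

-- ===== LEMMAS AND PROOFS =====

-- binary digits of m, MSB first (what Nat.toDigits 2 computes)
def binDigits (m : Nat) : List Char :=
  if h : m / 2 = 0 then [Nat.digitChar (m % 2)]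
  else binDigits (m / 2) ++ [Nat.digitChar (m % 2)]
termination_by m
decreasing_by omega

def zipA (X Y : List Char) : List Char :=
  List.zipWith (fun cx cy => if cx = '0' ∧ cy = '0' then ' ' else '#') X Y

-- B's overlay of one rendered string onto a row of the canvas
def overlayRow (row : List String) (cs : List Char) : List String :=
  List.zipWith (fun cell c => if c = '0' then cell else "#") row cs

-- the char list of A's per-row string x (resp. y): bin(v)[2:] zero-filled to width n
def rend (n a : Int) : List Char :=
  if a < 0 then
    List.replicate (n.toNat - ((binDigits a.natAbs).length + 1)) '0' ++ 'b' :: binDigits a.natAbs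
  else
    List.replicate (n.toNat - (binDigits a.natAbs).length) '0' ++ binDigits a.natAbs

theorem toDigitsCore_eq (m : Nat) : ∀ (f : Nat) (acc : List Char), m < f →
    Nat.toDigitsCore 2 f m acc = binDigits m ++ acc := by
  induction m using Nat.strong_induction_on with
  | _ m ih =>
    intro f acc hf
    match f with
    | 0 => omega
    | f + 1 =>
      rw [Nat.toDigitsCore]
      by_cases h : m / 2 = 0
      · simp [h, binDigits]
      · rw [if_neg h, ih (m / 2) (by omega) f _ (by omega)]
        conv_rhs => rw [binDigits, dif_neg h]
        simp

theorem toDigits_eq (m : Nat) : Nat.toDigits 2 m = binDigits m := by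
  rw [Nat.toDigits]
  simpa using toDigitsCore_eq m (m + 1) [] (by omega)

theorem binDigits_mem (m : Nat) : ∀ c ∈ binDigits m, c = '0' ∨ c = '1' := by
  induction m using Nat.strong_induction_on with
  | _ m ih =>
    intro c hc
    rw [binDigits] at hc
    have h2 : m % 2 = 0 ∨ m % 2 = 1 := by omega
    by_cases h : m / 2 = 0
    · simp [h] at hc
      rcases h2 with h2 | h2 <;> simp [hc, h2, Nat.digitChar]
    · simp [h] at hc
      rcases hc with hc | hc
      · exact ih (m / 2) (by omega) c hc
      · rcases h2 with h2 | h2 <;> simp [hc, h2, Nat.digitChar]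

theorem binDigits_ne_nil (m : Nat) : binDigits m ≠ [] := by
  rw [binDigits]
  by_cases h : m / 2 = 0 <;> simp [h]

-- zfill of a sign-free string is plain left padding
theorem zfill_nosign (c : Char) (rest : List Char) (w : Int)
    (hh : ¬(c = '+' ∨ c = '-')) :
    PySem.Chars.zfill (c :: rest) w
      = List.replicate (w.toNat - (c :: rest).length) '0' ++ (c :: rest) := by
  rw [PySem.Chars.zfill.eq_def]
  by_cases hw : w ≤ ((c :: rest).length : Int)
  · rw [if_pos hw]
    have : w.toNat - (c :: rest).length = 0 := by omega
    rw [this]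
    simp
  · rw [if_neg hw]
    simp only [if_neg hh]

-- A's per-row string, as a char list
theorem xList_eq (n a : Int) :
    (PySem.Str.zfill (PySem.Str.slice (PySem.Int.pyBin a) (some 2) none) n).toList
      = rend n a := by
  rw [PySem.Str.zfill, String.toList_ofList, PySem.Str.slice, String.toList_ofList,
      PySem.Chars.slice_eq_listSlice, PySem.List.slice_from _ (by norm_num)]
  rw [PySem.Int.pyBin, String.toList_ofList, PySem.Int.toBinChars0b]
  by_cases ha : a < 0
  · rw [if_pos ha, rend, if_pos ha]
    show PySem.Chars.zfill (List.drop 2 ('-' :: '0' :: 'b' :: Nat.toDigits 2 a.natAbs)) n = _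
    rw [List.drop_succ_cons, List.drop_succ_cons, List.drop_zero, toDigits_eq]
    rw [zfill_nosign 'b' (binDigits a.natAbs) n (by decide)]
    simp
  · rw [if_neg ha, rend, if_neg ha]
    show PySem.Chars.zfill (List.drop 2 ('0' :: 'b' :: Nat.toDigits 2 a.toNat)) n = _
    rw [List.drop_succ_cons, List.drop_succ_cons, List.drop_zero, toDigits_eq]
    have hna : a.toNat = a.natAbs := by omega
    rw [hna]
    obtain ⟨c, rest, hcr⟩ : ∃ c rest, binDigits a.natAbs = c :: rest := by
      cases hbd : binDigits a.natAbs with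
      | nil => exact absurd hbd (binDigits_ne_nil a.natAbs)
      | cons c rest => exact ⟨c, rest, rfl⟩
    have hc01 : c = '0' ∨ c = '1' := binDigits_mem a.natAbs c (by rw [hcr]; simp)
    have hcne : ¬(c = '+' ∨ c = '-') := by rcases hc01 with rfl | rfl <;> decide
    rw [hcr, zfill_nosign c rest n hcne, ← hcr]

theorem rend_length_ge (n a : Int) : n.toNat ≤ (rend n a).length := by
  rw [rend]
  by_cases ha : a < 0 <;> simp [ha] <;> omega

-- A's inner loop over an index range is zipWith over the first n chars of the two strings
theorem innerA_eq (x y : String) (N : Nat)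
    (hx : N ≤ x.toList.length) (hy : N ≤ y.toList.length) :
    ((PySem.List.pyRange 0 (N : Int) 1).foldl (fun tmp j =>
        match PySem.Str.pyGet? x j, PySem.Str.pyGet? y j with
        | some cx, some cy => if cx = '0' ∧ cy = '0' then tmp ++ " " else tmp ++ "#"
        | _, _ => tmp) "").toList
      = zipA (x.toList.take N) (y.toList.take N) := by
  have aux : ∀ m, m ≤ N → ∀ s : String,
      ((List.range m).foldl (fun tmp (k : Nat) =>
        match PySem.Str.pyGet? x ((0 : Int) + (k : Int)), PySem.Str.pyGet? y ((0 : Int) + (k : Int)) with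
        | some cx, some cy => if cx = '0' ∧ cy = '0' then tmp ++ " " else tmp ++ "#"
        | _, _ => tmp) s).toList
      = s.toList ++ zipA (x.toList.take m) (y.toList.take m) := by
    intro m
    induction m with
    | zero => intro _ s; simp [zipA]
    | succ m ihm =>
      intro hm s
      rw [List.range_succ, List.foldl_append, List.foldl_cons, List.foldl_nil]
      have hxg : PySem.Str.pyGet? x ((0 : Int) + (m : Int)) = some (x.toList[m]'(by omega)) := by
        rw [zero_add, PySem.Str.pyGet?_natCast, List.getElem?_eq_getElem (by omega)]
      have hyg : PySem.Str.pyGet? y ((0 : Int) + (m : Int)) = some (y.toList[m]'(by omega)) := by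
        rw [zero_add, PySem.Str.pyGet?_natCast, List.getElem?_eq_getElem (by omega)]
      rw [hxg, hyg]
      have hzs : zipA (x.toList.take (m + 1)) (y.toList.take (m + 1))
          = zipA (x.toList.take m) (y.toList.take m) ++
            [if x.toList[m]'(by omega) = '0' ∧ y.toList[m]'(by omega) = '0' then ' ' else '#'] := by
        rw [List.take_add_one, List.take_add_one,
            List.getElem?_eq_getElem (by omega : m < x.toList.length),
            List.getElem?_eq_getElem (by omega : m < y.toList.length)]
        unfold zipA
        rw [List.zipWith_append (by rw [List.length_take, List.length_take]; omega)]
        rfl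
      rw [hzs]
      have hsp : (" " : String).toList = [' '] := rfl
      have hhp : ("#" : String).toList = ['#'] := rfl
      by_cases hc : x.toList[m]'(by omega) = '0' ∧ y.toList[m]'(by omega) = '0'
      · simp only [if_pos hc]
        rw [String.toList_append, ihm (by omega) s, hsp]
        simp
      · simp only [if_neg hc]
        rw [String.toList_append, ihm (by omega) s, hhp]
        simp
  have hfin := aux N (le_refl N) ""
  rw [PySem.List.pyRange_one, List.foldl_map]
  simp only [Int.sub_zero, Int.toNat_natCast]
  rw [hfin]
  rfl

-- one overlay pass of B over the canvas: row i becomes overlayRow (row i) (rend n arr[i])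
theorem pass_eq (n : Int) (arr : List Int) (N : Nat) (harr : N ≤ arr.length)
    (f : Nat → List String) :
    ∀ (m : Nat), m ≤ N →
    (PySem.List.pyRange 0 (m : Int) 1).foldl (fun grid i =>
        match PySem.List.pyGet? arr i with
        | none => grid
        | some v =>
          match PySem.List.pyGet? grid i with
          | none => grid
          | some row =>
            grid.set i.toNat (List.zipWith (fun cell c => if c = '0' then cell else "#") row
              (PySem.Str.zfill (PySem.Str.slice (PySem.Int.pyBin v) (some 2) none) n).toList)) ((List.range N).map f)
      = (List.range N).map (fun i =>
          if i < m then overlayRow (f i) (rend n (arr.getD i 0)) else f i) := by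
  intro m
  induction m with
  | zero => simp [PySem.List.pyRange_one_eq_nil]
  | succ m ihm =>
    intro hm
    rw [show (((m + 1 : Nat)) : Int) = (m : Int) + 1 by push_cast; ring,
        PySem.List.pyRange_one_succ_right (by positivity), List.foldl_append,
        ihm (by omega), List.foldl_cons, List.foldl_nil]
    have hvg : PySem.List.pyGet? arr ((m : Nat) : Int) = some (arr[m]'(by omega)) := by
      rw [PySem.List.pyGet?_natCast, List.getElem?_eq_getElem (by omega)]
    have hgg : PySem.List.pyGet? ((List.range N).map (fun i =>
        if i < m then overlayRow (f i) (rend n (arr.getD i 0)) else f i)) ((m : Nat) : Int)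
        = some (f m) := by
      rw [PySem.List.pyGet?_natCast, List.getElem?_eq_getElem (by simp; omega)]
      simp
    rw [hvg, hgg]
    simp only [Int.toNat_natCast]
    apply List.ext_getElem
    · simp
    · intro i h1 h2
      simp only [List.length_set, List.length_map, List.length_range] at h1
      rw [List.getElem_set]
      by_cases him : m = i
      · rw [if_pos him]
        subst him
        rw [List.getElem_map, List.getElem_range, if_pos (show m < m + 1 by omega), xList_eq]
        simp only [overlayRow, List.getD,
          List.getElem?_eq_getElem (show m < arr.length by omega), Option.getD_some]
      · rw [if_neg him, List.getElem_map, List.getElem_range, List.getElem_map, List.getElem_range]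
        by_cases hi : i < m
        · rw [if_pos hi, if_pos (show i < m + 1 by omega)]
        · rw [if_neg hi, if_neg (show ¬ i < m + 1 by omega)]

-- A's outer loop: a foldl appending one rendered row per index is init ++ a map
theorem passA_eq (n : Int) (arr1 arr2 : List Int) (N : Nat)
    (h1 : N ≤ arr1.length) (h2 : N ≤ arr2.length) :
    ∀ (m : Nat), m ≤ N → ∀ (init : List String),
    (PySem.List.pyRange 0 (m : Int) 1).foldl (fun res i =>
      match PySem.List.pyGet? arr1 i, PySem.List.pyGet? arr2 i with
      | some a1, some a2 =>
        res ++ [(PySem.List.pyRange 0 (N : Int) 1).foldl (fun tmp j =>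
          match PySem.Str.pyGet? (PySem.Str.zfill (PySem.Str.slice (PySem.Int.pyBin a1) (some 2) none) n) j,
                PySem.Str.pyGet? (PySem.Str.zfill (PySem.Str.slice (PySem.Int.pyBin a2) (some 2) none) n) j with
          | some cx, some cy => if cx = '0' ∧ cy = '0' then tmp ++ " " else tmp ++ "#"
          | _, _ => tmp) ""]
      | _, _ => res) init
    = init ++ (List.range m).map (fun k =>
        (PySem.List.pyRange 0 (N : Int) 1).foldl (fun tmp j =>
          match PySem.Str.pyGet? (PySem.Str.zfill (PySem.Str.slice (PySem.Int.pyBin (arr1.getD k 0)) (some 2) none) n) j,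
                PySem.Str.pyGet? (PySem.Str.zfill (PySem.Str.slice (PySem.Int.pyBin (arr2.getD k 0)) (some 2) none) n) j with
          | some cx, some cy => if cx = '0' ∧ cy = '0' then tmp ++ " " else tmp ++ "#"
          | _, _ => tmp) "") := by
  intro m
  induction m with
  | zero => simp [PySem.List.pyRange_one_eq_nil]
  | succ m ihm =>
    intro hm init
    rw [show (((m + 1 : Nat)) : Int) = (m : Int) + 1 by push_cast; ring,
        PySem.List.pyRange_one_succ_right (by positivity), List.foldl_append,
        ihm (by omega), List.foldl_cons, List.foldl_nil]
    have hg1 : PySem.List.pyGet? arr1 ((m : Nat) : Int) = some (arr1[m]'(by omega)) := by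
      rw [PySem.List.pyGet?_natCast, List.getElem?_eq_getElem (by omega)]
    have hg2 : PySem.List.pyGet? arr2 ((m : Nat) : Int) = some (arr2[m]'(by omega)) := by
      rw [PySem.List.pyGet?_natCast, List.getElem?_eq_getElem (by omega)]
    rw [hg1, hg2, List.range_succ, List.map_append, List.map_singleton]
    simp [List.getD, List.getElem?_eq_getElem (show m < arr1.length by omega),
          List.getElem?_eq_getElem (show m < arr2.length by omega)]

-- two overlays on a blank row agree with A's character comparison
theorem rows_eq (X Y : List Char) (N : Nat) (hx : N ≤ X.length) (hy : N ≤ Y.length) :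
    (overlayRow (overlayRow (List.replicate N " ") X) Y).map String.toList
      = (zipA (X.take N) (Y.take N)).map (fun c => [c]) := by
  apply List.ext_getElem
  · simp [overlayRow, zipA]
    omega
  · intro i h1 h2
    simp only [List.length_map, overlayRow, List.length_zipWith, List.length_replicate,
      zipA, List.length_take] at h1 h2
    simp only [List.getElem_map, overlayRow, List.getElem_zipWith, List.getElem_replicate,
      zipA, List.getElem_take]
    by_cases hcx : X[i]'(by omega) = '0' <;> by_cases hcy : Y[i]'(by omega) = '0' <;>
      simp [hcx, hcy]

-- join of a row of " "/"#" cells, as a string of its chars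
theorem join_cells (row : List String) (cs : List Char)
    (h : row.map String.toList = cs.map (fun c => [c])) :
    PySem.Str.join "" row = String.ofList cs := by
  rw [PySem.Str.join]
  congr 1
  have hsep : ("" : String).toList = [] := rfl
  rw [hsep, h, PySem.Chars.join_nil_singletons]

-- A's inner comparison loop equals B's two overlays on a blank row, joined
theorem row_final (n : Int) (N : Nat) (hn : N ≤ n.toNat) (a b : Int) :
    (PySem.List.pyRange 0 (N : Int) 1).foldl (fun tmp j =>
        match PySem.Str.pyGet? (PySem.Str.zfill (PySem.Str.slice (PySem.Int.pyBin a) (some 2) none) n) j,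
              PySem.Str.pyGet? (PySem.Str.zfill (PySem.Str.slice (PySem.Int.pyBin b) (some 2) none) n) j with
        | some cx, some cy => if cx = '0' ∧ cy = '0' then tmp ++ " " else tmp ++ "#"
        | _, _ => tmp) ""
      = PySem.Str.join "" (overlayRow (overlayRow (List.replicate N " ") (rend n a)) (rend n b)) := by
  have hxl := xList_eq n a
  have hyl := xList_eq n b
  have hx : N ≤ (PySem.Str.zfill (PySem.Str.slice (PySem.Int.pyBin a) (some 2) none) n).toList.length := by
    rw [hxl]; exact le_trans hn (rend_length_ge n a)
  have hy : N ≤ (PySem.Str.zfill (PySem.Str.slice (PySem.Int.pyBin b) (some 2) none) n).toList.length := by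
    rw [hyl]; exact le_trans hn (rend_length_ge n b)
  rw [join_cells _ (zipA ((rend n a).take N) ((rend n b).take N))
        (by rw [rows_eq _ _ N (by rw [← hxl]; exact hx) (by rw [← hyl]; exact hy)])]
  rw [← String.toList_inj, String.toList_ofList, ← hxl, ← hyl]
  exact innerA_eq _ _ N hx hy

-- ===== VERDICT (by name: the statement is the Claim_ definition above) =====
theorem solution_spec : Claim_equal_solution := by
  intro n arr1 arr2 _ hpre
  obtain ⟨hl1, hl2⟩ := hpre
  rw [PySem.List.len_eq] at hl1 hl2
  unfold Spec_solution solution solution_alt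
  simp only [List.foldl_cons, List.foldl_nil]
  set N := n.toNat with hN
  have hn1 : N ≤ arr1.length := by omega
  have hn2 : N ≤ arr2.length := by omega
  have hr : PySem.List.pyRange 0 n 1 = PySem.List.pyRange 0 (N : Int) 1 := by
    by_cases h0 : 0 ≤ n
    · congr 1
      omega
    · rw [PySem.List.pyRange_one_eq_nil (by omega), PySem.List.pyRange_one_eq_nil (by omega)]
  have hrep : List.replicate N (List.replicate N (" " : String))
      = (List.range N).map (fun _ => List.replicate N (" " : String)) := by
    simp [List.map_const']
  rw [hr, hrep,
      pass_eq n arr1 N hn1 _ N le_rfl, pass_eq n arr2 N hn2 _ N le_rfl,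
      passA_eq n arr1 arr2 N hn1 hn2 N le_rfl [], List.map_map]
  simp only [List.nil_append]
  apply List.map_congr_left
  intro k hk
  rw [List.mem_range] at hk
  simp only [Function.comp_apply, if_pos hk,
    List.getD, List.getElem?_eq_getElem (show k < arr1.length by omega),
    List.getElem?_eq_getElem (show k < arr2.length by omega), Option.getD_some]
  exact row_final n N le_rfl _ _
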